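-- pv_equiv track=rewrite | github.com/Jonstep101010/advent-of-code | 2025/day-10/process2.py | button_combination_patterns
-- ===== SOURCE A (Python) =====
-- import itertools
--
-- def button_combination_patterns(
-- 	coeffs: list[tuple[bool, ...]],
-- ) -> dict[tuple[bool, ...], dict[tuple[int, ...], int]]:
-- 	"""
-- 	Group all possible button combinations by parity pattern.
--
-- 	For each parity pattern, store the minimal button press count needed to achieve it.
-- 	"""
-- 	num_joltages = len(coeffs[0])
-- 	patterns_by_parity = {
-- 		parity: {} for parity in itertools.product(range(2), repeat=num_joltages)
-- 	}
--
-- 	# Try all 2^n subsets of buttons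
-- 	for num_buttons in range(len(coeffs) + 1):
-- 		for button_indices in itertools.combinations(range(len(coeffs)), num_buttons):
-- 			# Sum coefficients for selected buttons
-- 			effect = tuple(
-- 				sum(coeffs[i][j] for i in button_indices) for j in range(num_joltages)
-- 			)
-- 			parity = tuple(bool(e % 2) for e in effect)
--
-- 			# Store minimal press count for this effect
-- 			if effect not in patterns_by_parity[parity]:
-- 				patterns_by_parity[parity][effect] = num_buttons
--
-- 	return patterns_by_parity
-- ===== SOURCE B (Python) =====
-- import itertools
--
--
-- def button_combination_patterns(
-- 	coeffs: list[tuple[bool, ...]],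
-- ) -> dict[tuple[bool, ...], dict[tuple[int, ...], int]]:
-- 	"""
-- 	Group all possible button combinations by parity pattern, keeping the
-- 	minimal press count per effect.
--
-- 	Instead of re-summing the selected coefficient rows for every subset
-- 	(O(2^n * n * m)), grow the subsets level by level: each size-k subset's
-- 	effect is extended to its size-(k+1) successors by adding one row,
-- 	so every effect costs O(n + m) to produce (O(2^n * (n + m)) total).
-- 	Subsets of a given size are generated in the same lexicographic order
-- 	that itertools.combinations uses, so insertion order is preserved.
-- 	"""
-- 	n = len(coeffs)
-- 	m = len(coeffs[0])
-- 	patterns = {parity: {} for parity in itertools.product(range(2), repeat=m)}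
-- 	# frontier of (next extendable button index, effect of the subset)
-- 	level = [(0, (0,) * m)]
-- 	for count in range(n + 1):
-- 		nxt = []
-- 		for start, eff in level:
-- 			parity = tuple(bool(e % 2) for e in eff)
-- 			bucket = patterns[parity]
-- 			if eff not in bucket:
-- 				bucket[eff] = count
-- 			for i in range(start, n):
-- 				row = coeffs[i]
-- 				nxt.append((i + 1, tuple(e + c for e, c in zip(eff, row))))
-- 		level = nxt
-- 	return patterns
-- ===== Notes on version B (the rewrite author's own statement) =====
-- stated objective: faster
-- what changed: Instead of re-summing the chosen coefficient rows for every subset produced by itertools.combinations, B grows a frontier of (next-index, effect) pairs level by level, deriving each subset's effect from its size-(k-1) predecessor by adding one row, in the same size-then-lex order, so insertion order and minimal counts are unchanged.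
-- outside the precondition, e.g. on button_combination_patterns([]): A raises IndexError, B raises IndexError; on button_combination_patterns([(True, False), (True,)]): A raises IndexError, B raises KeyError
import Mathlib
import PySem

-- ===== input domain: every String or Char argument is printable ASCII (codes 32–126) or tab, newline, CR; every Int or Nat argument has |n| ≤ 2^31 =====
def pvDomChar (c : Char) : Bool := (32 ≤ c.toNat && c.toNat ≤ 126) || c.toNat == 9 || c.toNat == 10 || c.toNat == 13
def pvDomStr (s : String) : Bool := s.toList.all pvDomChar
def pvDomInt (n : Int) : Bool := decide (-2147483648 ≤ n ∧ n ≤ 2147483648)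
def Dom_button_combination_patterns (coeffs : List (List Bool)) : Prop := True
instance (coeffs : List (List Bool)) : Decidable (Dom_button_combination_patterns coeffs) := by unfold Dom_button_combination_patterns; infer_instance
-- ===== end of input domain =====

-- B replaces A's per-subset re-summation (itertools.combinations + sum over selected rows)
-- by a level-by-level frontier that derives each subset's effect from its predecessor by
-- adding one row, in the same size-then-lexicographic order (objective: faster).

-- ===== PORT A =====
-- Python sums booleans as 0/1
def pvB2I (b : Bool) : Int := if b then 1 else 0

-- itertools.combinations(l, k): the k-element sublists, in lexicographic order (exact)
def pvComb : List Nat → Nat → List (List Nat)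
  | _, 0 => [[]]
  | [], _ + 1 => []
  | x :: xs, k + 1 => ((pvComb xs k).map (fun c => x :: c)) ++ pvComb xs (k + 1)

-- itertools.product(range(2), repeat=m) (exact: rightmost position varies fastest)
def pvParities : Nat → List (List Int)
  | 0 => [[]]
  | k + 1 => ([0, 1] : List Int).flatMap (fun b => (pvParities k).map (fun p => b :: p))

-- coeffs[i][j]; on every use both indices are in range under Pre_, so getD is exact there
def pvEntry (coeffs : List (List Bool)) (i j : Nat) : Int :=
  pvB2I ((coeffs.getD i []).getD j false)

-- tuple(sum(coeffs[i][j] for i in button_indices) for j in range(num_joltages))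
def pvEffectA (coeffs : List (List Bool)) (m : Nat) (c : List Nat) : List Int :=
  (List.range m).map (fun j => (c.map (fun i => pvEntry coeffs i j)).sum)

-- tuple(bool(e % 2) for e in effect); Lean's Int % 2 = emod matches Python's % (positive modulus)
def pvParityOf (eff : List Int) : List Int :=
  eff.map (fun e => if e % 2 = 0 then (0 : Int) else 1)

-- {parity: {} for parity in itertools.product(range(2), repeat=num_joltages)}
def pvInitDict (m : Nat) : PySem.Dict (List Int) (PySem.Dict (List Int) Int) :=
  (pvParities m).foldl (fun d p => d.insert p PySem.Dict.empty) PySem.Dict.empty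

-- if effect not in patterns_by_parity[parity]: patterns_by_parity[parity][effect] = cnt
-- (the 'none' branch is unreachable: parity always is a key of the initial dict)
def pvStore (d : PySem.Dict (List Int) (PySem.Dict (List Int) Int))
    (parity eff : List Int) (cnt : Int) : PySem.Dict (List Int) (PySem.Dict (List Int) Int) :=
  match d.get? parity with
  | none => d
  | some inner => if (inner.get? eff).isSome then d else d.insert parity (inner.insert eff cnt)

def button_combination_patterns (coeffs : List (List Bool)) : List (List Int × List (List Int × Int)) :=
  let m := (coeffs.getD 0 []).length     -- len(coeffs[0]); Pre_ excludes coeffs = [], where Python raises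
  let n := coeffs.length
  let final := (List.range (n + 1)).foldl (fun d k =>
      (pvComb (List.range n) k).foldl (fun d c =>
        let eff := pvEffectA coeffs m c
        pvStore d (pvParityOf eff) eff (Int.ofNat k)) d)
    (pvInitDict m)
  final.items.map (fun pr => (pr.1, pr.2.items))

-- ===== PORT B =====
-- tuple(e + c for e, c in zip(eff, row))
def pvAddRow (row : List Bool) (eff : List Int) : List Int :=
  (eff.zip row).map (fun ec => ec.1 + pvB2I ec.2)

def button_combination_patterns_alt (coeffs : List (List Bool)) : List (List Int × List (List Int × Int)) :=
  let n := coeffs.length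
  let m := (coeffs.getD 0 []).length
  let final := (List.range (n + 1)).foldl (fun st k =>
      st.2.foldl (fun st2 se =>
        (pvStore st2.1 (pvParityOf se.2) se.2 (Int.ofNat k),
         -- range(start, n) over naturals is List.range' start (n - start) (exact)
         st2.2 ++ (List.range' se.1 (n - se.1)).map (fun i => (i + 1, pvAddRow (coeffs.getD i []) se.2))))
        (st.1, ([] : List (Nat × List Int))))
    (pvInitDict m, [((0 : Nat), List.replicate m (0 : Int))])
  final.1.items.map (fun pr => (pr.1, pr.2.items))

-- ===== PRECONDITION & SPEC =====
-- Pre_ excludes exactly the inputs where the Python A raises IndexError: coeffs == []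
-- (coeffs[0]) and rows shorter than coeffs[0] (coeffs[i][j] for j < len(coeffs[0])).
def Pre_button_combination_patterns (coeffs : List (List Bool)) : Prop :=
  coeffs ≠ [] ∧ ∀ r ∈ coeffs, (coeffs.getD 0 []).length ≤ r.length
instance (coeffs : List (List Bool)) : Decidable (Pre_button_combination_patterns coeffs) := by unfold Pre_button_combination_patterns; infer_instance

def pvWitness_button_combination_patterns : List (List Bool) := [[true, false], [false, true]]

def Spec_button_combination_patterns (coeffs : List (List Bool)) (out : List (List Int × List (List Int × Int))) : Prop := out = button_combination_patterns_alt coeffs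
instance (coeffs : List (List Bool)) (out : List (List Int × List (List Int × Int))) : Decidable (Spec_button_combination_patterns coeffs out) := by unfold Spec_button_combination_patterns; infer_instance

-- ===== CLAIM (what is proved, stated in full; the proofs are below) =====
def Claim_equal_button_combination_patterns : Prop := ∀ (coeffs : List (List Bool)), Dom_button_combination_patterns coeffs → Pre_button_combination_patterns coeffs → Spec_button_combination_patterns coeffs (button_combination_patterns coeffs)

-- ===== LEMMAS AND PROOFS =====

def pvStart (c : List Nat) : Nat :=
  match c.getLast? with
  | none => 0
  | some t => t + 1

theorem pvComb_length : ∀ (l : List Nat) (k : Nat), ∀ c ∈ pvComb l k, c.length = k := by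
  intro l
  induction l with
  | nil =>
    intro k c hc
    cases k with
    | zero => simp only [pvComb, List.mem_singleton] at hc; simp [hc]
    | succ k => simp [pvComb] at hc
  | cons x xs ih =>
    intro k c hc
    cases k with
    | zero => simp only [pvComb, List.mem_singleton] at hc; simp [hc]
    | succ k =>
      simp only [pvComb, List.mem_append, List.mem_map] at hc
      rcases hc with ⟨c', hc', rfl⟩ | hc
      · simp [ih k c' hc']
      · exact ih (k+1) c hc

theorem pvComb_subset : ∀ (l : List Nat) (k : Nat), ∀ c ∈ pvComb l k, ∀ a ∈ c, a ∈ l := by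
  intro l
  induction l with
  | nil =>
    intro k c hc a ha
    cases k with
    | zero => simp only [pvComb, List.mem_singleton] at hc; subst hc; simp at ha
    | succ k => simp [pvComb] at hc
  | cons x xs ih =>
    intro k c hc a ha
    cases k with
    | zero => simp only [pvComb, List.mem_singleton] at hc; subst hc; simp at ha
    | succ k =>
      simp only [pvComb, List.mem_append, List.mem_map] at hc
      rcases hc with ⟨c', hc', rfl⟩ | hc
      · rcases List.mem_cons.mp ha with rfl | ha
        · simp
        · exact List.mem_cons_of_mem _ (ih k c' hc' a ha)
      · exact List.mem_cons_of_mem _ (ih (k+1) c hc a ha)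

theorem pvFilter_range (n s : Nat) :
    (List.range n).filter (fun i => s ≤ i) = List.range' s (n - s) := by
  induction n with
  | zero => simp
  | succ n ih =>
    rw [List.range_succ, List.filter_append, ih]
    by_cases h : s ≤ n
    · have h2 : n + 1 - s = (n - s) + 1 := by omega
      rw [h2, List.range'_1_concat]
      have h3 : s + (n - s) = n := by omega
      simp [h, h3]
    · have : n + 1 - s = 0 := by omega
      simp [h, this, Nat.sub_eq_zero_of_le (by omega : n ≤ s)]

theorem pvStart_append (c : List Nat) (i : Nat) : pvStart (c ++ [i]) = i + 1 := by
  simp [pvStart]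
theorem pvStart_cons (x : Nat) (c : List Nat) (hc : c ≠ []) : pvStart (x :: c) = pvStart c := by
  cases c with
  | nil => exact absurd rfl hc
  | cons y c' => simp [pvStart, List.getLast?_cons_cons]

theorem pvStart_not_le (x : Nat) (xs c : List Nat) (hc : c ≠ [])
    (hsub : ∀ a ∈ c, a ∈ xs) (hx : ∀ y ∈ xs, x < y) : ¬ (pvStart c ≤ x) := by
  have hmem : c.getLast hc ∈ xs := hsub _ (List.getLast_mem hc)
  have : pvStart c = c.getLast hc + 1 := by
    simp [pvStart, List.getLast?_eq_some_getLast hc]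
  have hxl := hx _ hmem
  omega
theorem pvComb_succ (l : List Nat) (hl : l.Pairwise (· < ·)) (k : Nat) :
    pvComb l (k + 1) =
      (pvComb l k).flatMap (fun c => (l.filter (fun i => pvStart c ≤ i)).map (fun i => c ++ [i])) := by
  induction l generalizing k with
  | nil => cases k <;> simp [pvComb]
  | cons x xs ih =>
    rw [List.pairwise_cons] at hl
    obtain ⟨hx, hxs⟩ := hl
    have hxall : xs.filter (fun i => pvStart ([] : List Nat) ≤ i) = xs := by
      simp [pvStart]
    cases k with
    | zero =>
      have h1 : pvComb xs 1 = xs.map (fun i => [i]) := by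
        rw [ih hxs 0]; simp [pvComb, pvStart]
      simp [pvComb, pvStart, h1]
    | succ j =>
      have ihj := ih hxs j
      have ihj1 := ih hxs (j+1)
      show (pvComb xs (j+1)).map (x :: ·) ++ pvComb xs (j+2)
        = (pvComb (x :: xs) (j+1)).flatMap
            (fun c => ((x :: xs).filter (fun i => pvStart c ≤ i)).map (fun i => c ++ [i]))
      have hunfold : pvComb (x :: xs) (j+1) = (pvComb xs j).map (x :: ·) ++ pvComb xs (j+1) := rfl
      rw [hunfold, List.flatMap_append, List.flatMap_map]
      have piece2 : (pvComb xs (j+1)).flatMap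
          (fun c => ((x :: xs).filter (fun i => pvStart c ≤ i)).map (fun i => c ++ [i]))
          = pvComb xs (j+2) := by
        rw [ihj1]
        apply List.flatMap_congr
        intro c hc
        have hne : c ≠ [] := by
          have := pvComb_length xs (j+1) c hc
          intro h; subst h; simp at this
        have hfilt : (x :: xs).filter (fun i => pvStart c ≤ i) = xs.filter (fun i => pvStart c ≤ i) := by
          rw [List.filter_cons]
          simp [pvStart_not_le x xs c hne (pvComb_subset xs (j+1) c hc) hx]
        rw [hfilt]
      have piece1 : (pvComb xs j).flatMap
          (fun c => ((x :: xs).filter (fun i => pvStart (x :: c) ≤ i)).map (fun i => (x :: c) ++ [i]))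
          = (pvComb xs (j+1)).map (x :: ·) := by
        rw [ihj, List.map_flatMap]
        apply List.flatMap_congr
        intro c hc
        have hfilt : (x :: xs).filter (fun i => pvStart (x :: c) ≤ i)
            = xs.filter (fun i => pvStart c ≤ i) := by
          cases hce : c with
          | nil =>
            subst hce
            have h1 : pvStart [x] = x + 1 := by simp [pvStart]
            rw [h1, List.filter_cons]
            have : ¬ (x + 1 ≤ x) := by omega
            simp only [this, decide_eq_true_eq]
            rw [hxall]
            apply List.filter_eq_self.mpr
            intro y hy
            simp only [decide_eq_true_eq]
            have := hx y hy
            omega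
          | cons y c' =>
            subst hce
            rw [pvStart_cons x (y :: c') (by simp), List.filter_cons]
            simp [pvStart_not_le x xs (y :: c') (by simp)
              (pvComb_subset xs j (y :: c') hc) hx]
        rw [hfilt, List.map_map]
        rfl
      rw [piece2, piece1]
theorem pvEffectA_nil (coeffs : List (List Bool)) (m : Nat) :
    pvEffectA coeffs m [] = List.replicate m 0 := by
  simp [pvEffectA]

theorem pvEffectA_append (coeffs : List (List Bool)) (c : List Nat) (i : Nat)
    (hi : i < coeffs.length)
    (hrow : (coeffs.getD 0 []).length ≤ (coeffs.getD i []).length) :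
    pvEffectA coeffs (coeffs.getD 0 []).length (c ++ [i]) =
      pvAddRow (coeffs.getD i []) (pvEffectA coeffs (coeffs.getD 0 []).length c) := by
  set m := (coeffs.getD 0 []).length with hm
  set row := coeffs.getD i [] with hrw
  apply List.ext_getElem
  · simp [pvEffectA, pvAddRow]; omega
  · intro j h1 h2
    have hj : j < m := by simpa [pvEffectA] using h1
    have hjr : j < row.length := by omega
    simp only [pvEffectA, pvAddRow, List.getElem_map, List.getElem_zip, List.getElem_range,
      List.map_append, List.sum_append, List.map_cons, List.map_nil, List.sum_cons, List.sum_nil]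
    simp only [pvEntry, add_zero]
    have e3 : (coeffs.getD i []).getD j false = row[j] := List.getD_eq_getElem row false hjr
    rw [e3]
theorem pvMain (coeffs : List (List Bool))
    (hrows : ∀ r ∈ coeffs, (coeffs.getD 0 []).length ≤ r.length) (j : Nat) :
    (List.range j).foldl (fun st k =>
        st.2.foldl (fun st2 se =>
          (pvStore st2.1 (pvParityOf se.2) se.2 (Int.ofNat k),
           st2.2 ++ (List.range' se.1 (coeffs.length - se.1)).map
             (fun i => (i + 1, pvAddRow (coeffs.getD i []) se.2))))
          (st.1, ([] : List (Nat × List Int))))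
      (pvInitDict (coeffs.getD 0 []).length, [((0 : Nat), List.replicate (coeffs.getD 0 []).length (0 : Int))])
    = ((List.range j).foldl (fun d k =>
          (pvComb (List.range coeffs.length) k).foldl (fun d c =>
            let eff := pvEffectA coeffs (coeffs.getD 0 []).length c
            pvStore d (pvParityOf eff) eff (Int.ofNat k)) d)
        (pvInitDict (coeffs.getD 0 []).length),
       (pvComb (List.range coeffs.length) j).map
         (fun c => (pvStart c, pvEffectA coeffs (coeffs.getD 0 []).length c))) := by
  induction j with
  | zero =>
    simp [pvComb, pvStart, pvEffectA_nil]
  | succ j ih =>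
    rw [List.range_succ, List.foldl_append, List.foldl_append, ih]
    simp only [List.foldl_cons, List.foldl_nil]
    rw [PySem.List.foldl_prod_mk
      (f := fun d (se : Nat × List Int) => pvStore d (pvParityOf se.2) se.2 (Int.ofNat j))
      (g := fun acc (se : Nat × List Int) => acc ++ (List.range' se.1 (coeffs.length - se.1)).map
        (fun i => (i + 1, pvAddRow (coeffs.getD i []) se.2)))]
    rw [PySem.List.foldl_append_eq_flatMap, List.nil_append, List.foldl_map]
    refine congrArg₂ Prod.mk ?_ ?_
    · rfl
    · rw [List.flatMap_map, pvComb_succ _ List.pairwise_lt_range j, List.map_flatMap]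
      apply List.flatMap_congr
      intro c hc
      rw [pvFilter_range, List.map_map]
      simp only []
      apply List.map_congr_left
      intro i hi2
      have hin : i < coeffs.length := by
        have := List.mem_range'_1.mp hi2
        omega
      have hmem : coeffs.getD i [] ∈ coeffs := by
        rw [List.getD_eq_getElem _ _ hin]; exact List.getElem_mem hin
      have hrow := hrows _ hmem
      show (i + 1, pvAddRow (coeffs.getD i []) (pvEffectA coeffs (coeffs.getD 0 []).length c))
          = (pvStart (c ++ [i]), pvEffectA coeffs (coeffs.getD 0 []).length (c ++ [i]))
      rw [pvStart_append, pvEffectA_append coeffs c i hin hrow]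

-- ===== VERDICT (by name: the statement is the Claim_ definition above) =====
theorem button_combination_patterns_spec : Claim_equal_button_combination_patterns := by
  intro coeffs _ hpre
  unfold Spec_button_combination_patterns
  have hB : button_combination_patterns_alt coeffs
      = ((List.range (coeffs.length + 1)).foldl (fun st k =>
            st.2.foldl (fun st2 se =>
              (pvStore st2.1 (pvParityOf se.2) se.2 (Int.ofNat k),
               st2.2 ++ (List.range' se.1 (coeffs.length - se.1)).map
                 (fun i => (i + 1, pvAddRow (coeffs.getD i []) se.2))))
              (st.1, ([] : List (Nat × List Int))))
          (pvInitDict (coeffs.getD 0 []).length,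
           [((0 : Nat), List.replicate (coeffs.getD 0 []).length (0 : Int))])).1.items.map
          (fun pr => (pr.1, pr.2.items)) := rfl
  rw [hB, pvMain coeffs hpre.2 (coeffs.length + 1)]
  rfl
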